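-- pv_equiv track=rewrite | github.com/neumantm/AdventOfCode2025 | 01/main.py | rotate_by_brute_force
-- ===== SOURCE A (Python) =====
-- DIAL_MAX = 99
--
-- def rotate_by_brute_force(current_number: int, amount: int) -> tuple[int, int]:
--     """
--     returns new number and amount of zero-passes
--     """
--
--     num = current_number
--     zero_passes = 0
--
--     for i in range(abs(amount)):
--         if amount > 0:
--             num += 1
--         else:
--             num -= 1
--         if num > DIAL_MAX:
--             num = 0
--         if num < 0:
--             num = DIAL_MAX
--         if num == 0:
--             zero_passes += 1
--
--     return num, zero_passes
-- ===== SOURCE B (Python) =====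
-- def _click(number: int, direction: int) -> int:
--     """one click of the dial: advance, wrapping past 99 to 0 and below 0 to 99"""
--     number += direction
--     if number > 99:
--         number = 0
--     if number < 0:
--         number = 99
--     return number
--
--
-- def rotate_by_brute_force(current_number: int, amount: int) -> tuple[int, int]:
--     """
--     returns new number and amount of zero-passes
--
--     Rotating by n clicks = one click, then n-1 more; after the first click the
--     position is on the dial, so the remaining clicks are pure modular arithmetic.
--     """
--     if amount == 0:
--         return current_number, 0
--     direction = 1 if amount > 0 else -1
--     num = _click(current_number, direction)
--     passes = 1 if num == 0 else 0
--     k = abs(amount) - 1  # remaining clicks, done in closed form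
--     if direction == 1:
--         return (num + k) % 100, passes + (num + k) // 100
--     return (num - k) % 100, passes + (k + (100 - num) % 100) // 100
-- ===== Notes on version B (the rewrite author's own statement) =====
-- stated objective: faster
-- what changed: Replaced the step-by-step simulation loop over range(abs(amount)) with O(1) arithmetic: one simulated click lands the position on the dial, after which the final number is plain modular arithmetic and zero-passes come from an integer division.
import Mathlib
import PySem

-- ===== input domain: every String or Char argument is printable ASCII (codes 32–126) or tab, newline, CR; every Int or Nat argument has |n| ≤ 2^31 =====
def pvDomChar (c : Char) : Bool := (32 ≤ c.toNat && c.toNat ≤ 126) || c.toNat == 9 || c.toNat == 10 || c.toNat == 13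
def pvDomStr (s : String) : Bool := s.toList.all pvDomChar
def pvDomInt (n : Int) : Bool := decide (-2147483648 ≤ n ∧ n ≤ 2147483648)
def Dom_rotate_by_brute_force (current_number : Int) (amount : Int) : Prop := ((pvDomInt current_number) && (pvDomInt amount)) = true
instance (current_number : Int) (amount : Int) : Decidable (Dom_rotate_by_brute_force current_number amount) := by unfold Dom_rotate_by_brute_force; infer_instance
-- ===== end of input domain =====

-- B replaces A's O(|amount|) simulation loop by one simulated click plus O(1) modular arithmetic (measured faster).

-- ===== PORT A =====
-- one iteration of A's loop body (the index i is unused by the body)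
def rbfStep (amount : Int) (s : Int × Int) : Int × Int :=
  let num := if amount > 0 then s.1 + 1 else s.1 - 1
  let num := if num > 99 then 0 else num
  let num := if num < 0 then 99 else num
  let zero_passes := if num = 0 then s.2 + 1 else s.2
  (num, zero_passes)

def rotate_by_brute_force (current_number : Int) (amount : Int) : Int × Int :=
  (PySem.List.pyRange 0 (|amount|) 1).foldl (fun s _ => rbfStep amount s) (current_number, 0)

-- ===== PORT B =====
-- one click of the dial: advance, wrapping past 99 to 0 and below 0 to 99
def rbfClick (number : Int) (direction : Int) : Int :=
  let number := number + direction
  let number := if number > 99 then 0 else number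
  if number < 0 then 99 else number

def rotate_by_brute_force_alt (current_number : Int) (amount : Int) : Int × Int :=
  if amount = 0 then (current_number, 0)
  else
    let direction : Int := if amount > 0 then 1 else -1
    let num := rbfClick current_number direction
    let passes : Int := if num = 0 then 1 else 0
    let k := |amount| - 1
    if direction = 1 then
      (PySem.Int.mod (num + k) 100, passes + PySem.Int.floordiv (num + k) 100)
    else
      (PySem.Int.mod (num - k) 100, passes + PySem.Int.floordiv (k + PySem.Int.mod (100 - num) 100) 100)

-- ===== PRECONDITION & SPEC =====
def Spec_rotate_by_brute_force (current_number : Int) (amount : Int) (out : Int × Int) : Prop := out = rotate_by_brute_force_alt current_number amount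
instance (current_number : Int) (amount : Int) (out : Int × Int) : Decidable (Spec_rotate_by_brute_force current_number amount out) := by unfold Spec_rotate_by_brute_force; infer_instance

-- ===== CLAIM =====
def Claim_equal_rotate_by_brute_force : Prop := ∀ (current_number : Int) (amount : Int), Dom_rotate_by_brute_force current_number amount → Spec_rotate_by_brute_force current_number amount (rotate_by_brute_force current_number amount)

-- ===== LEMMAS AND PROOFS =====

-- the loop body ignores the loop index, so the fold is an iterate of the step
theorem foldl_const_step (f : Int × Int → Int × Int) :
    ∀ (l : List Int) (s : Int × Int), l.foldl (fun s _ => f s) s = f^[l.length] s := by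
  intro l
  induction l with
  | nil => intro s; rfl
  | cons x xs ih =>
      intro s
      simp [List.foldl, ih, Function.iterate_succ_apply]

theorem click_mem (c d : Int) : 0 ≤ rbfClick c d ∧ rbfClick c d ≤ 99 := by
  unfold rbfClick
  dsimp only
  split_ifs <;> omega

-- A's first loop iteration is exactly one click in the sign direction of amount
theorem step_eq_click (a c z : Int) :
    rbfStep a (c, z) =
      (rbfClick c (if a > 0 then 1 else -1),
       if rbfClick c (if a > 0 then 1 else -1) = 0 then z + 1 else z) := by
  unfold rbfStep rbfClick
  by_cases ha : a > 0 <;> simp [ha] <;> split_ifs <;> simp_all <;> omega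

-- on the dial, k positive steps land on (p+k)%100 and pass zero (p+k)/100 times
theorem iter_pos (a : Int) (ha : 0 < a) :
    ∀ (k : Nat) (p z : Int), 0 ≤ p → p ≤ 99 →
      (rbfStep a)^[k] (p, z) = ((p + k) % 100, z + (p + k) / 100) := by
  intro k
  induction k with
  | zero => intro p z h0 h99; simp; omega
  | succ n ih =>
      intro p z h0 h99
      rw [Function.iterate_succ_apply]
      by_cases hp : p = 99
      · have hstep : rbfStep a (p, z) = (0, z + 1) := by
          simp [rbfStep, hp, ha]
        rw [hstep, ih 0 (z + 1) (by omega) (by omega)]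
        simp only [Prod.mk.injEq]; push_cast; constructor <;> omega
      · have hstep : rbfStep a (p, z) = (p + 1, z) := by
          simp only [rbfStep, if_pos ha]
          have h1 : ¬ (p + 1 > 99) := by omega
          have h2 : ¬ (p + 1 < 0) := by omega
          have h3 : ¬ (p + 1 = 0) := by omega
          simp [h1, h2, h3]
        rw [hstep, ih (p + 1) z (by omega) (by omega)]
        simp only [Prod.mk.injEq]; push_cast; constructor <;> omega

-- on the dial, k negative steps land on (p-k)%100, passing zero (k+(100-p)%100)/100 times
theorem iter_neg (a : Int) (ha : ¬ 0 < a) :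
    ∀ (k : Nat) (p z : Int), 0 ≤ p → p ≤ 99 →
      (rbfStep a)^[k] (p, z) = ((p - k) % 100, z + (k + (100 - p) % 100) / 100) := by
  intro k
  induction k with
  | zero => intro p z h0 h99; simp; omega
  | succ n ih =>
      intro p z h0 h99
      rw [Function.iterate_succ_apply]
      by_cases hp0 : p = 0
      · have hstep : rbfStep a (p, z) = (99, z) := by
          simp [rbfStep, hp0, ha]
        rw [hstep, ih 99 z (by omega) (by omega)]
        simp only [Prod.mk.injEq]; push_cast; constructor <;> omega
      · by_cases hp1 : p = 1
        · have hstep : rbfStep a (p, z) = (0, z + 1) := by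
            simp [rbfStep, hp1, ha]
          rw [hstep, ih 0 (z + 1) (by omega) (by omega)]
          simp only [Prod.mk.injEq]; push_cast; constructor <;> omega
        · have hstep : rbfStep a (p, z) = (p - 1, z) := by
            simp only [rbfStep, if_neg ha]
            have h1 : ¬ (p - 1 > 99) := by omega
            have h2 : ¬ (p - 1 < 0) := by omega
            have h3 : ¬ (p - 1 = 0) := by omega
            simp [h1, h2, h3]
          rw [hstep, ih (p - 1) z (by omega) (by omega)]
          simp only [Prod.mk.injEq]; push_cast; constructor <;> omega

-- ===== VERDICT =====
theorem rotate_by_brute_force_spec : Claim_equal_rotate_by_brute_force := by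
  intro c a _
  unfold Spec_rotate_by_brute_force rotate_by_brute_force rotate_by_brute_force_alt
  rw [foldl_const_step, PySem.List.length_pyRange_one]
  by_cases h0 : a = 0
  · simp [h0]
  · rw [if_neg h0]
    by_cases hpos : 0 < a
    · have habs : (|a| - 0).toNat = (a - 1).toNat + 1 := by
        rw [abs_of_pos hpos]; omega
      rw [habs, Function.iterate_succ_apply, step_eq_click, if_pos hpos]
      obtain ⟨hp0, hp99⟩ := click_mem c 1
      rw [iter_pos a hpos (a - 1).toNat _ _ hp0 hp99]
      have hk : (((a - 1).toNat : Int)) = a - 1 := by omega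
      rw [hk, if_pos rfl, abs_of_pos hpos,
          PySem.Int.mod_eq_emod_of_pos (by norm_num : (0:Int) < 100),
          PySem.Int.floordiv_eq_ediv_of_pos (by norm_num : (0:Int) < 100)]
      simp only [Prod.mk.injEq]
      refine ⟨trivial, by split_ifs <;> omega⟩
    · have haneg : a < 0 := by omega
      have habs : (|a| - 0).toNat = (-a - 1).toNat + 1 := by
        rw [abs_of_neg haneg]; omega
      rw [habs, Function.iterate_succ_apply, step_eq_click, if_neg hpos]
      obtain ⟨hp0, hp99⟩ := click_mem c (-1)
      rw [iter_neg a hpos (-a - 1).toNat _ _ hp0 hp99]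
      have hk : (((-a - 1).toNat : Int)) = -a - 1 := by omega
      rw [hk, if_neg (by norm_num : ¬ ((-1 : Int)) = 1), abs_of_neg haneg,
          PySem.Int.mod_eq_emod_of_pos (by norm_num : (0:Int) < 100),
          PySem.Int.mod_eq_emod_of_pos (by norm_num : (0:Int) < 100),
          PySem.Int.floordiv_eq_ediv_of_pos (by norm_num : (0:Int) < 100)]
      simp only [Prod.mk.injEq]
      refine ⟨trivial, by split_ifs <;> omega⟩
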